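-- pv_equiv track=rewrite | github.com/Ed-Cheng/impoved-information-retrieval-model | task3.py | LM_dictionary
-- ===== SOURCE A (Python) =====
-- def LM_dictionary(LM_ranking):
--     '''save the ranking results to dictionary for later analysis'''
--     evaluate_dict = {}
--     for row in LM_ranking:
--         qid = row[0]
--         pid = row[2]
--         if qid not in evaluate_dict:
--             evaluate_dict[qid] = [pid]
--         else:
--             evaluate_dict[qid].append(pid)
--
--     return evaluate_dict
-- ===== SOURCE B (Python) =====
-- def LM_dictionary(LM_ranking):
--     '''save the ranking results to dictionary for later analysis'''
--     qids = list(dict.fromkeys(row[0] for row in LM_ranking))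
--     return {qid: [row[2] for row in LM_ranking if row[0] == qid] for qid in qids}
-- ===== Notes on version B (the rewrite author's own statement) =====
-- stated objective: alternative
-- what changed: Replaces the single streaming dict-building pass with a two-phase grouping: first an ordered dedup of the query ids, then a dict comprehension that collects each qid's pids with a filter pass over the input.
import Mathlib
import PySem

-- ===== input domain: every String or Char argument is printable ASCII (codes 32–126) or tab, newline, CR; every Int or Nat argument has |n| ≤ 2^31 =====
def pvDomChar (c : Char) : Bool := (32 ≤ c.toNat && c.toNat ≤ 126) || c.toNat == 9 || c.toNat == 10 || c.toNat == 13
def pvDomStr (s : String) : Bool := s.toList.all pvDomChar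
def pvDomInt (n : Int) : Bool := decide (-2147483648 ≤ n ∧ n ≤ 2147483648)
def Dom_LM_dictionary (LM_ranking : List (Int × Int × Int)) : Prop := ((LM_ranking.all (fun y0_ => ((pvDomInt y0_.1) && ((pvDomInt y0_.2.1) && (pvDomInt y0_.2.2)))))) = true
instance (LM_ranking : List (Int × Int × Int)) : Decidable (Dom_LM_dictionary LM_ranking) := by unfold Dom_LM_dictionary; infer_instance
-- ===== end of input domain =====

-- B groups pids per qid in two phases (ordered dedup of qids, then one filter pass per qid)
-- instead of A's single streaming dict-building pass; same return value, no speed claim.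

-- ===== PORT A =====
def LM_dictionary (LM_ranking : List (Int × Int × Int)) : List (Int × List Int) :=
  (LM_ranking.foldl (fun evaluate_dict row =>
      let qid := row.1
      let pid := row.2.2
      if evaluate_dict.contains qid = false then
        evaluate_dict.insert qid [pid]
      else
        evaluate_dict.modify qid [] (fun l => l ++ [pid]))
    (PySem.Dict.empty : PySem.Dict Int (List Int))).items

-- ===== PORT B =====
def LM_dictionary_alt (LM_ranking : List (Int × Int × Int)) : List (Int × List Int) :=
  let qids := PySem.List.dedup (LM_ranking.map (fun row => row.1))
  qids.map (fun qid => (qid, (LM_ranking.filter (fun row => row.1 == qid)).map (fun row => row.2.2)))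

-- ===== PRECONDITION & SPEC =====
def Spec_LM_dictionary (LM_ranking : List (Int × Int × Int)) (out : List (Int × List Int)) : Prop := out = LM_dictionary_alt LM_ranking
instance (LM_ranking : List (Int × Int × Int)) (out : List (Int × List Int)) : Decidable (Spec_LM_dictionary LM_ranking out) := by unfold Spec_LM_dictionary; infer_instance

-- ===== CLAIM (what is proved, stated in full; the proofs are below) =====
def Claim_equal_LM_dictionary : Prop := ∀ (LM_ranking : List (Int × Int × Int)), Dom_LM_dictionary LM_ranking → Spec_LM_dictionary LM_ranking (LM_dictionary LM_ranking)

-- ===== LEMMAS AND PROOFS =====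

-- A's two branches coincide with a single `modify` with default [] (on a missing key,
-- modify inserts [] ++ [pid] = [pid], which is exactly A's insert branch).
theorem lmdict_step_eq (d : PySem.Dict Int (List Int)) (row : Int × Int × Int) :
    (if d.contains row.1 = false then d.insert row.1 [row.2.2]
     else d.modify row.1 [] (fun l => l ++ [row.2.2]))
      = d.modify row.1 [] (fun l => l ++ [row.2.2]) := by
  by_cases h : d.contains row.1 = false
  · simp only [h, PySem.Dict.modify, PySem.Dict.getD_of_not_contains _ _ h]
    simp
  · simp [h]

theorem lmdict_fold_eq (LM_ranking : List (Int × Int × Int)) :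
    (LM_ranking.foldl (fun d row =>
        if d.contains row.1 = false then d.insert row.1 [row.2.2]
        else d.modify row.1 [] (fun l => l ++ [row.2.2]))
      (PySem.Dict.empty : PySem.Dict Int (List Int)))
    = LM_ranking.foldl (fun d row => d.modify row.1 [] (fun l => l ++ [row.2.2]))
      (PySem.Dict.empty : PySem.Dict Int (List Int)) := by
  have : (fun (d : PySem.Dict Int (List Int)) (row : Int × Int × Int) =>
      if d.contains row.1 = false then d.insert row.1 [row.2.2]
      else d.modify row.1 [] (fun l => l ++ [row.2.2]))
      = fun d row => d.modify row.1 [] (fun l => l ++ [row.2.2]) := by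
    funext d row; exact lmdict_step_eq d row
  rw [this]

-- ===== VERDICT (by name: the statement is the Claim_ definition above) =====
theorem LM_dictionary_spec : Claim_equal_LM_dictionary := by
  intro rows _
  show LM_dictionary rows = LM_dictionary_alt rows
  unfold LM_dictionary LM_dictionary_alt
  simp only []
  rw [lmdict_fold_eq]
  set D := rows.foldl (fun d row => d.modify row.1 [] (fun l => l ++ [row.2.2]))
      (PySem.Dict.empty : PySem.Dict Int (List Int)) with hD
  have hkeys : D.keys = PySem.List.dedup (rows.map (fun row => row.1)) := by
    rw [hD, PySem.Dict.keys_foldl_modify_key rows (fun row => row.1) []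
      (fun _ row l => l ++ [row.2.2])]
    simp [PySem.Dict.keys_empty, PySem.Set.update, PySem.List.dedup_eq_ofList,
      PySem.Set.ofList_eq_foldl]
  have hnodup : D.keys.Nodup := by
    rw [hD]
    exact PySem.Dict.nodup_keys_foldl_modify_key rows (fun row => row.1) []
      (fun _ row l => l ++ [row.2.2]) _ (by simp)
  have hgetD : ∀ c : Int, D.getD c [] = (rows.filter (fun row => row.1 == c)).map (fun row => row.2.2) := by
    intro c
    have hfold : D = (rows.map (fun row => (row.1, row.2.2))).foldl
        (fun d p => d.modify p.1 [] (fun l => l ++ [p.2])) PySem.Dict.empty := by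
      rw [hD, List.foldl_map]
    rw [hfold, PySem.Dict.getD_foldl_modify_append]
    simp only [List.filter_map, List.map_map]
    rfl
  rw [PySem.Dict.items_eq_map_keys D hnodup [], hkeys]
  apply List.map_congr_left
  intro q _
  rw [hgetD q]
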